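-- pv_equiv track=rewrite | github.com/birdman74/advent-of-code-2021 | src/day17.py | steps_for_vel
-- ===== SOURCE A (Python) =====
-- from typing import List
--
-- def steps_for_vel(x_range: List[int], x_vel: int):
--     steps = []
--
--     min_x = min(x_range)
--     max_x = max(x_range)
--
--     step = 0
--     dist = 0
--     while x_vel > -1:
--         if min_x <= dist <= max_x:
--             steps.append(step)
--         elif max_x < dist:
--             break
--
--         step += 1
--         dist += x_vel
--         x_vel -= 1
--
--     # does our x velocity stall in the range
--     if min_x <= dist <= max_x:
--         steps.append(-1)
--
--     return steps
-- ===== SOURCE B (Python) =====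
-- from typing import List
--
-- def _first(pred, lo, hi):
--     # smallest s in [lo, hi) with pred(s), or hi if there is none
--     while lo < hi:
--         mid = (lo + hi) // 2
--         if pred(mid):
--             hi = mid
--         else:
--             lo = mid + 1
--     return lo
--
-- def steps_for_vel(x_range: List[int], x_vel: int):
--     min_x = min(x_range)
--     max_x = max(x_range)
--     if x_vel >= 0:
--         v = x_vel
--         def dist(s):
--             return v * s - s * (s - 1) // 2
--         # dist is nondecreasing on [0, v+1]: binary-search the window of in-range steps
--         entry = _first(lambda s: dist(s) >= min_x, 0, v + 1)
--         stop = _first(lambda s: dist(s) > max_x, 0, v + 1)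
--         steps = list(range(entry, stop))
--         rest = v * (v + 1) // 2
--     else:
--         steps = []
--         rest = 0
--     if min_x <= rest <= max_x:
--         steps.append(-1)
--     return steps
-- ===== Notes on version B (the rewrite author's own statement) =====
-- stated objective: alternative
-- what changed: Replaces the step-by-step velocity simulation with a closed-form distance formula d(s)=v*s-s*(s-1)//2 and two binary searches that locate the contiguous window of in-range steps, emitting it as a range; the stall sentinel -1 is decided from the closed-form resting position v*(v+1)//2.
import Mathlib
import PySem

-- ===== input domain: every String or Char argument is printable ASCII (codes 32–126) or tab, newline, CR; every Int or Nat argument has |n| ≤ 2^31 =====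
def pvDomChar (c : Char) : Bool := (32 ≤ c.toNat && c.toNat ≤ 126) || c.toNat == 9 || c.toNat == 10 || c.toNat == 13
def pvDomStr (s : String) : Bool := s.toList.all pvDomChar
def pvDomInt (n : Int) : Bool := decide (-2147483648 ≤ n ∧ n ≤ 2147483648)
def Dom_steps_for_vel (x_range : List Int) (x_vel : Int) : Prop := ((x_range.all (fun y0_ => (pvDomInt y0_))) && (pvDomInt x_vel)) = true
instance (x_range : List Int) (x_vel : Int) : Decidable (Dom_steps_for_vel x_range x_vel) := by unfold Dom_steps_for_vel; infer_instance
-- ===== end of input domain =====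

-- B replaces A's step-by-step simulation by a closed-form distance formula with two
-- binary searches for the window of in-range steps (objective: alternative algorithm).

-- ===== PORT A =====
-- the while loop: fuel = (x_vel+1).toNat iterations suffice since x_vel drops by 1 each pass;
-- returns (steps, final dist)
def loopA (min_x max_x : Int) : Nat → Int → Int → Int → List Int × Int
  | 0, _, _, dist => ([], dist)
  | fuel+1, x_vel, step, dist =>
    if x_vel > -1 then
      if min_x ≤ dist ∧ dist ≤ max_x then
        let r := loopA min_x max_x fuel (x_vel - 1) (step + 1) (dist + x_vel)
        (step :: r.1, r.2)
      else if max_x < dist then ([], dist)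
      else loopA min_x max_x fuel (x_vel - 1) (step + 1) (dist + x_vel)
    else ([], dist)

def steps_for_vel (x_range : List Int) (x_vel : Int) : List Int :=
  match PySem.List.min? x_range (fun y => y), PySem.List.max? x_range (fun y => y) with
  | some min_x, some max_x =>
    let r := loopA min_x max_x (x_vel + 1).toNat x_vel 0 0
    if min_x ≤ r.2 ∧ r.2 ≤ max_x then r.1 ++ [-1] else r.1
  | _, _ => []  -- min([]) raises ValueError in Python; excluded by Pre_

-- ===== PORT B =====
-- x-distance after s steps, closed form: v*s - s*(s-1)//2
def distB (v s : Int) : Int := v * s - PySem.Int.floordiv (s * (s - 1)) 2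

-- _first: binary search, smallest s in [lo, hi) with pred(s), or hi if none;
-- fuel = initial (hi-lo).toNat bounds the iterations (the width at least halves each pass)
def firstB (pred : Int → Bool) : Nat → Int → Int → Int
  | 0, lo, _ => lo
  | fuel+1, lo, hi =>
    if lo < hi then
      let mid := PySem.Int.floordiv (lo + hi) 2
      if pred mid then firstB pred fuel lo mid
      else firstB pred fuel (mid + 1) hi
    else lo

def steps_for_vel_alt (x_range : List Int) (x_vel : Int) : List Int :=
  match PySem.List.min? x_range (fun y => y) with
  | none => []  -- empty list: Python raises ValueError (excluded by Pre_)
  | some min_x =>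
    match PySem.List.max? x_range (fun y => y) with
    | none => []
    | some max_x =>
      let sr :=
        if x_vel ≥ 0 then
          let v := x_vel
          let entry := firstB (fun s => min_x ≤ distB v s) (v + 1).toNat 0 (v + 1)
          let stop := firstB (fun s => max_x < distB v s) (v + 1).toNat 0 (v + 1)
          (PySem.List.pyRange entry stop 1, PySem.Int.floordiv (v * (v + 1)) 2)
        else (([] : List Int), (0 : Int))
      if min_x ≤ sr.2 ∧ sr.2 ≤ max_x then sr.1 ++ [-1] else sr.1

-- ===== PRECONDITION & SPEC =====
-- Pre_ excludes only the empty list, on which Python's min() raises ValueError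
def Pre_steps_for_vel (x_range : List Int) (x_vel : Int) : Prop := x_range ≠ []
instance (x_range : List Int) (x_vel : Int) : Decidable (Pre_steps_for_vel x_range x_vel) := by unfold Pre_steps_for_vel; infer_instance
def pvWitness_steps_for_vel : List Int × Int := ([20, 30], 7)

def Spec_steps_for_vel (x_range : List Int) (x_vel : Int) (out : List Int) : Prop := out = steps_for_vel_alt x_range x_vel
instance (x_range : List Int) (x_vel : Int) (out : List Int) : Decidable (Spec_steps_for_vel x_range x_vel out) := by unfold Spec_steps_for_vel; infer_instance

-- ===== CLAIM (what is proved, stated in full; the proofs are below) =====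
def Claim_equal_steps_for_vel : Prop := ∀ (x_range : List Int) (x_vel : Int), Dom_steps_for_vel x_range x_vel → Pre_steps_for_vel x_range x_vel → Spec_steps_for_vel x_range x_vel (steps_for_vel x_range x_vel)

-- ===== LEMMAS AND PROOFS =====

-- cumulative distance gained after k iterations starting with velocity n: n + (n-1) + … + (n-k+1)
def S (n : Nat) : Nat → Int
  | 0 => 0
  | k+1 => S n k + ((n : Int) - (k : Int))

lemma S_nonneg (n : Nat) : ∀ k : Nat, k ≤ n + 1 → 0 ≤ S n k := by
  intro k
  induction k with
  | zero => intro _; simp [S]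
  | succ k ih =>
    intro hk
    have h1 := ih (by omega)
    have h2 : (k : Int) ≤ (n : Int) := by exact_mod_cast by omega
    simp only [S]; omega

lemma S_succ_shift (n : Nat) : ∀ k : Nat, S (n+1) (k+1) = ((n : Int) + 1) + S n k := by
  intro k
  induction k with
  | zero => simp [S]
  | succ k ih =>
    show S (n+1) (k+1) + (((n+1 : Nat) : Int) - ((k+1 : Nat) : Int)) = ((n : Int) + 1) + (S n k + ((n : Int) - (k : Int)))
    rw [ih]; push_cast; ring

lemma distB_succ (v s : Int) : distB v (s + 1) = distB v s + (v - s) := by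
  unfold distB
  rw [PySem.Int.floordiv_eq_ediv_of_pos (by omega), PySem.Int.floordiv_eq_ediv_of_pos (by omega)]
  have h : (s + 1) * (s + 1 - 1) = s * (s - 1) + 2 * s := by ring
  have h2 : v * (s + 1) = v * s + v := by ring
  rw [h, h2]
  generalize s * (s - 1) = a
  generalize v * s = b
  omega

lemma S_eq_distB (n : Nat) : ∀ k : Nat, S n k = distB (n : Int) (k : Int) := by
  intro k
  induction k with
  | zero => simp [S, distB]
  | succ k ih =>
    have h : ((k + 1 : Nat) : Int) = (k : Int) + 1 := by push_cast; ring
    rw [h, distB_succ]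
    simp only [S, ih]

lemma distB_mono (n : Nat) : ∀ (d : Nat) (s : Int), 0 ≤ s → s + d ≤ (n : Int) + 1 →
    distB (n : Int) s ≤ distB (n : Int) (s + d) := by
  intro d
  induction d with
  | zero => intro s _ _; simp
  | succ d ih =>
    intro s hs hd
    have h1 : distB (n : Int) s ≤ distB (n : Int) (s + d) := ih s hs (by push_cast at hd ⊢; omega)
    have h2 : distB (n : Int) (s + d + 1) = distB (n : Int) (s + d) + ((n : Int) - (s + d)) :=
      distB_succ _ _
    have h3 : s + (d : Int) ≤ (n : Int) := by push_cast at hd; omega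
    have h4 : s + ((d : Nat) + 1 : Nat) = s + (d : Int) + 1 := by push_cast; ring
    rw [h4, h2]; omega

lemma distB_le_of_le (n : Nat) (s t : Int) (hs : 0 ≤ s) (hst : s ≤ t) (ht : t ≤ (n : Int) + 1) :
    distB (n : Int) s ≤ distB (n : Int) t := by
  have h : s + ((t - s).toNat : Int) = t := by omega
  have := distB_mono n (t - s).toNat s hs (by rw [h]; exact ht)
  rwa [h] at this

-- the loop's visible result: its step list, with -1 appended when the final dist stalls in range
def outA (mn mx : Int) (fuel : Nat) (xv step dist : Int) : List Int :=
  let r := loopA mn mx fuel xv step dist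
  if mn ≤ r.2 ∧ r.2 ≤ mx then r.1 ++ [-1] else r.1

lemma runA (mn mx : Int) : ∀ (n : Nat) (step dist : Int),
    outA mn mx (n+1) (n : Int) step dist =
      ((List.range (n+1)).filterMap (fun k =>
        if mn ≤ dist + S n k ∧ dist + S n k ≤ mx then some (step + (k : Int)) else none))
      ++ (if mn ≤ dist + S n (n+1) ∧ dist + S n (n+1) ≤ mx then [-1] else []) := by
  intro n
  induction n with
  | zero =>
    intro step dist
    have h0 : (0 : Int) > -1 := by omega
    simp only [outA, loopA, if_pos h0, Nat.cast_zero]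
    by_cases hin : mn ≤ dist ∧ dist ≤ mx
    · simp [hin, S]
    · simp only [if_neg hin]
      by_cases hbr : mx < dist
      · have hc : ¬ (mn ≤ dist ∧ dist ≤ mx) := hin
        simp [hbr, hc, S]
      · simp [hbr, hin, S]
  | succ n ih =>
    intro step dist
    have hcast : ((n+1 : Nat) : Int) = (n : Int) + 1 := by push_cast; ring
    rw [hcast]
    have hrange : List.range (n+1+1) = 0 :: (List.range (n+1)).map Nat.succ :=
      List.range_succ_eq_map
    have hguard : ((n : Int) + 1) > -1 := by omega
    have hxv : ((n : Int) + 1) - 1 = (n : Int) := by ring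
    have hfm : List.filterMap ((fun k : Nat =>
          if mn ≤ dist + S (n+1) k ∧ dist + S (n+1) k ≤ mx then some (step + (k : Int)) else none)
          ∘ Nat.succ) (List.range (n+1))
        = List.filterMap (fun k : Nat =>
          if mn ≤ (dist + ((n:Int)+1)) + S n k ∧ (dist + ((n:Int)+1)) + S n k ≤ mx
            then some ((step + 1) + (k : Int)) else none) (List.range (n+1)) := by
      refine List.filterMap_congr (fun k _ => ?_)
      simp only [Function.comp]
      rw [show S (n+1) (Nat.succ k) = ((n : Int) + 1) + S n k from S_succ_shift n k]
      rw [show dist + ((n : Int) + 1 + S n k) = (dist + ((n:Int)+1)) + S n k from by ring]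
      rw [show step + ((Nat.succ k : Nat) : Int) = (step + 1) + (k : Int) from by push_cast; ring]
    have htail : (if mn ≤ dist + S (n+1) (n+1+1) ∧ dist + S (n+1) (n+1+1) ≤ mx
            then ([-1] : List Int) else [])
        = (if mn ≤ (dist + ((n:Int)+1)) + S n (n+1) ∧ (dist + ((n:Int)+1)) + S n (n+1) ≤ mx
            then [-1] else []) := by
      rw [show S (n+1) (n+1+1) = ((n : Int) + 1) + S n (n+1) from S_succ_shift n (n+1)]
      rw [show dist + ((n : Int) + 1 + S n (n+1)) = (dist + ((n:Int)+1)) + S n (n+1) from by ring]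
    by_cases hin : mn ≤ dist ∧ dist ≤ mx
    · -- first branch: append step, recurse
      have hL : outA mn mx (n+1+1) ((n:Int)+1) step dist
          = step :: outA mn mx (n+1) (n : Int) (step+1) (dist + ((n:Int)+1)) := by
        simp only [outA, loopA, if_pos hguard, if_pos hin, hxv]
        split_ifs <;> simp
      rw [hL, ih, hrange]
      simp only [List.filterMap_cons, List.filterMap_map]
      have hz : (if mn ≤ dist + S (n+1) 0 ∧ dist + S (n+1) 0 ≤ mx
          then some (step + ((0 : Nat) : Int)) else none) = some step := by
        rw [if_pos (by simpa [S] using hin)]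
        norm_num
      rw [hz, hfm, htail]
      rfl
    · by_cases hbr : mx < dist
      · -- break: dist already beyond max; nothing more appended, no -1 either
        have hL : outA mn mx (n+1+1) ((n:Int)+1) step dist = [] := by
          simp only [outA, loopA, if_pos hguard, if_neg hin, if_pos hbr]
        rw [hL]
        have hnone : ∀ k : Nat, k ≤ n + 1 + 1 →
            ¬ (mn ≤ dist + S (n+1) k ∧ dist + S (n+1) k ≤ mx) := by
          intro k hk h
          have := S_nonneg (n+1) k hk
          omega
        have h1 : (List.range (n+1+1)).filterMap (fun k =>
            if mn ≤ dist + S (n+1) k ∧ dist + S (n+1) k ≤ mx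
              then some (step + (k : Int)) else none) = [] := by
          rw [List.filterMap_eq_nil_iff]
          intro k hk
          rw [List.mem_range] at hk
          rw [if_neg (hnone k (by omega))]
        rw [h1, if_neg (hnone (n+1+1) (by omega))]
        rfl
      · -- below the range: skip this step, recurse
        have hL : outA mn mx (n+1+1) ((n:Int)+1) step dist
            = outA mn mx (n+1) (n : Int) (step+1) (dist + ((n:Int)+1)) := by
          simp only [outA, loopA, if_pos hguard, if_neg hin, if_neg hbr, hxv]
        rw [hL, ih, hrange]
        simp only [List.filterMap_cons, List.filterMap_map]
        have hz : (if mn ≤ dist + S (n+1) 0 ∧ dist + S (n+1) 0 ≤ mx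
            then some (step + ((0 : Nat) : Int)) else none) = none := by
          rw [if_neg (by simpa [S] using hin)]
        rw [hz, hfm, htail]

-- binary-search correctness: firstB finds the boundary of a monotone predicate
lemma firstB_spec (p : Int → Bool) (H : Int)
    (hmono : ∀ s t : Int, 0 ≤ s → s ≤ t → t < H → p s = true → p t = true) :
    ∀ (fuel : Nat) (lo hi : Int), 0 ≤ lo → lo ≤ hi → hi ≤ H → (hi - lo).toNat ≤ fuel →
      lo ≤ firstB p fuel lo hi ∧ firstB p fuel lo hi ≤ hi ∧
      (∀ s, lo ≤ s → s < firstB p fuel lo hi → p s = false) ∧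
      (∀ s, firstB p fuel lo hi ≤ s → s < hi → p s = true) := by
  intro fuel
  induction fuel with
  | zero =>
    intro lo hi h0 hlh hH hw
    have : lo = hi := by omega
    subst this
    simp only [firstB]
    refine ⟨le_refl _, le_refl _, ?_, ?_⟩ <;> intro s h1 h2 <;> omega
  | succ fuel ih =>
    intro lo hi h0 hlh hH hw
    by_cases hlt : lo < hi
    · have hmid := PySem.Int.floordiv_two_mid_bounds hlh
      have hmlt : PySem.Int.floordiv (lo + hi) 2 < hi := by
        rw [PySem.Int.floordiv_lt_iff_lt_mul (by omega)]
        omega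
      set mid := PySem.Int.floordiv (lo + hi) 2 with hmiddef
      by_cases hp : p mid = true
      · have hrec := ih lo mid h0 hmid.1 (by omega) (by omega)
        have hunf : firstB p (fuel+1) lo hi = firstB p fuel lo mid := by
          simp only [firstB, if_pos hlt, ← hmiddef, if_pos hp]
        rw [hunf]
        refine ⟨hrec.1, by omega, hrec.2.2.1, ?_⟩
        intro s h1 h2
        by_cases hs : s < mid
        · exact hrec.2.2.2 s h1 hs
        · exact hmono mid s (by omega) (by omega) (by omega) hp
      · have hrec := ih (mid + 1) hi (by omega) (by omega) hH (by omega)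
        have hunf : firstB p (fuel+1) lo hi = firstB p fuel (mid + 1) hi := by
          simp only [firstB, if_pos hlt, ← hmiddef, hp]
          simp
        rw [hunf]
        refine ⟨by omega, hrec.2.1, ?_, hrec.2.2.2⟩
        intro s h1 h2
        by_cases hs : mid + 1 ≤ s
        · exact hrec.2.2.1 s hs h2
        · -- s ≤ mid: if p s were true then p mid would be true
          cases hps : p s with
          | false => rfl
          | true =>
            exact absurd (hmono s mid (by omega) (by omega) (by omega) hps) hp
    · have : lo = hi := by omega
      subst this
      simp only [firstB, if_neg hlt]
      refine ⟨le_refl _, le_refl _, ?_, ?_⟩ <;> intro s h1 h2 <;> omega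

-- a filterMap over range m selecting an integer interval [e, x) is the pyRange of the interval
lemma filterMap_range_interval (e x : Int) (he : 0 ≤ e) : ∀ m : Nat,
    (List.range m).filterMap (fun k : Nat =>
      if e ≤ (k : Int) ∧ (k : Int) < x then some ((k : Int)) else none)
    = PySem.List.pyRange e (min x (m : Int)) 1 := by
  intro m
  induction m with
  | zero =>
    rw [PySem.List.pyRange_one_eq_nil (by omega)]
    simp
  | succ m ih =>
    rw [List.range_succ, List.filterMap_append, ih]
    simp only [List.filterMap_cons, List.filterMap_nil]
    by_cases hx : x ≤ (m : Int)
    · have h1 : min x ((m : Int)) = x := by omega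
      have h2 : min x ((m : Int) + 1) = x := by omega
      have h3 : ¬ (e ≤ (m : Int) ∧ (m : Int) < x) := by omega
      rw [if_neg h3]
      push_cast
      rw [h2, h1]
      simp
    · have h1 : min x ((m : Int)) = (m : Int) := by omega
      have h2 : min x ((m : Int) + 1) = (m : Int) + 1 := by omega
      push_cast
      rw [h2, h1]
      by_cases he2 : e ≤ (m : Int)
      · rw [if_pos ⟨he2, by omega⟩, PySem.List.pyRange_one_succ_right he2]
      · rw [if_neg (by omega)]
        rw [PySem.List.pyRange_one_eq_nil (by omega), PySem.List.pyRange_one_eq_nil (by omega)]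
        simp
    
-- the resting distance: distB v v = v*(v+1)//2
lemma distB_rest (v : Int) : distB v v = PySem.Int.floordiv (v * (v + 1)) 2 := by
  unfold distB
  rw [PySem.Int.floordiv_eq_ediv_of_pos (by omega), PySem.Int.floordiv_eq_ediv_of_pos (by omega)]
  have h : v * (v + 1) = v * (v - 1) + 2 * v := by ring
  have h3 : v * v = v * (v - 1) + v := by ring
  have heven : Even (v * (v - 1)) := by
    have h4 := Int.even_mul_succ_self (v - 1)
    simp only [sub_add_cancel] at h4
    rwa [mul_comm]
  rw [h, h3]
  obtain ⟨m, hm⟩ := heven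
  rw [hm]
  omega

-- core equality for a fixed extracted min/max pair
lemma core_eq (mn mx xv : Int) :
    (let r := loopA mn mx (xv + 1).toNat xv 0 0
     if mn ≤ r.2 ∧ r.2 ≤ mx then r.1 ++ [-1] else r.1)
    = (let sr :=
        if xv ≥ 0 then
          let entry := firstB (fun s => decide (mn ≤ distB xv s)) (xv + 1).toNat 0 (xv + 1)
          let stop := firstB (fun s => decide (mx < distB xv s)) (xv + 1).toNat 0 (xv + 1)
          (PySem.List.pyRange entry stop 1, PySem.Int.floordiv (xv * (xv + 1)) 2)
        else (([] : List Int), (0 : Int))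
       if mn ≤ sr.2 ∧ sr.2 ≤ mx then sr.1 ++ [-1] else sr.1) := by
  by_cases hv : xv ≥ 0
  · obtain ⟨n, rfl⟩ : ∃ n : Nat, xv = (n : Int) := ⟨xv.toNat, by omega⟩
    have hfuel : ((n : Int) + 1).toNat = n + 1 := by omega
    have hA := runA mn mx n 0 0
    simp only [outA, hfuel] at hA ⊢
    rw [hA, if_pos hv]
    -- rewrite the A side: 0 + S n k = distB n k
    have hfun : ∀ k : Nat, k ∈ List.range (n+1) →
        (fun k : Nat => if mn ≤ (0:Int) + S n k ∧ (0:Int) + S n k ≤ mx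
            then some ((0:Int) + (k : Int)) else none) k
        = (fun k : Nat =>
            if (firstB (fun s => decide (mn ≤ distB (n:Int) s)) (n+1) 0 ((n:Int) + 1)) ≤ (k : Int)
               ∧ (k : Int) < (firstB (fun s => decide (mx < distB (n:Int) s)) (n+1) 0 ((n:Int) + 1))
            then some ((k : Int)) else none) k := by
      have hm1 : ∀ s t : Int, 0 ≤ s → s ≤ t → t < (n : Int) + 1 →
          decide (mn ≤ distB (n:Int) s) = true → decide (mn ≤ distB (n:Int) t) = true := by
        intro s t hs hst ht h
        rw [decide_eq_true_iff] at h ⊢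
        exact le_trans h (distB_le_of_le n s t hs hst (by omega))
      have hm2 : ∀ s t : Int, 0 ≤ s → s ≤ t → t < (n : Int) + 1 →
          decide (mx < distB (n:Int) s) = true → decide (mx < distB (n:Int) t) = true := by
        intro s t hs hst ht h
        rw [decide_eq_true_iff] at h ⊢
        exact lt_of_lt_of_le h (distB_le_of_le n s t hs hst (by omega))
      have h1 := firstB_spec _ ((n : Int) + 1) hm1 (n+1) 0 ((n:Int)+1)
        (le_refl 0) (by omega) (le_refl _) (by omega)
      have h2 := firstB_spec _ ((n : Int) + 1) hm2 (n+1) 0 ((n:Int)+1)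
        (le_refl 0) (by omega) (le_refl _) (by omega)
      set e := firstB (fun s => decide (mn ≤ distB (n:Int) s)) (n+1) 0 ((n:Int) + 1) with hedef
      set x := firstB (fun s => decide (mx < distB (n:Int) s)) (n+1) 0 ((n:Int) + 1) with hxdef
      intro k hk
      rw [List.mem_range] at hk
      have hkI : (k : Int) < (n : Int) + 1 := by exact_mod_cast by omega
      have hSd := S_eq_distB n k
      simp only [zero_add, hSd]
      have hiff : (mn ≤ distB (n:Int) (k:Int) ∧ distB (n:Int) (k:Int) ≤ mx)
          ↔ (e ≤ (k : Int) ∧ (k : Int) < x) := by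
        constructor
        · rintro ⟨ha, hb⟩
          constructor
          · by_contra hlt
            have := h1.2.2.1 (k : Int) (by omega) (by omega)
            rw [decide_eq_false_iff_not] at this
            exact this ha
          · by_contra hge
            have := h2.2.2.2 (k : Int) (by omega) hkI
            rw [decide_eq_true_iff] at this
            omega
        · rintro ⟨ha, hb⟩
          constructor
          · have := h1.2.2.2 (k : Int) ha hkI
            rwa [decide_eq_true_iff] at this
          · have := h2.2.2.1 (k : Int) (by omega) hb
            rw [decide_eq_false_iff_not] at this
            omega
      by_cases hc : mn ≤ distB (n:Int) (k:Int) ∧ distB (n:Int) (k:Int) ≤ mx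
      · rw [if_pos hc, if_pos (hiff.1 hc)]
      · rw [if_neg hc, if_neg (fun h => hc (hiff.2 h))]
    rw [List.filterMap_congr hfun]
    -- now apply the interval lemma
    have h1 := firstB_spec (fun s => decide (mn ≤ distB (n:Int) s)) ((n : Int) + 1)
      (by
        intro s t hs hst ht h
        rw [decide_eq_true_iff] at h ⊢
        exact le_trans h (distB_le_of_le n s t hs hst (by omega)))
      (n+1) 0 ((n:Int)+1) (le_refl 0) (by omega) (le_refl _) (by omega)
    have h2 := firstB_spec (fun s => decide (mx < distB (n:Int) s)) ((n : Int) + 1)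
      (by
        intro s t hs hst ht h
        rw [decide_eq_true_iff] at h ⊢
        exact lt_of_lt_of_le h (distB_le_of_le n s t hs hst (by omega)))
      (n+1) 0 ((n:Int)+1) (le_refl 0) (by omega) (le_refl _) (by omega)
    set e := firstB (fun s => decide (mn ≤ distB (n:Int) s)) (n+1) 0 ((n:Int) + 1) with hedef
    set x := firstB (fun s => decide (mx < distB (n:Int) s)) (n+1) 0 ((n:Int) + 1) with hxdef
    have hmin : min x ((n:Int)+1) = x := by
      have := h2.2.1; omega
    have hint := filterMap_range_interval e x h1.1 (n+1)
    push_cast at hint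
    rw [hmin] at hint
    rw [hint]
    -- the stall check: S n (n+1) = distB n n = v*(v+1)//2
    have hstall : (0 : Int) + S n (n+1) = PySem.Int.floordiv ((n:Int) * ((n:Int) + 1)) 2 := by
      have h3 : S n (n+1) = S n n := by simp [S]
      rw [zero_add, h3, S_eq_distB n n, distB_rest (n:Int)]
    rw [hstall]
    simp
    split_ifs <;> simp
  · have hfuel : (xv + 1).toNat = 0 := by omega
    rw [hfuel, if_neg hv]
    simp [loopA]

-- ===== VERDICT (by name: the statement is the Claim_ definition above) =====
theorem steps_for_vel_spec : Claim_equal_steps_for_vel := by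
  intro x_range x_vel _ _
  unfold Spec_steps_for_vel steps_for_vel steps_for_vel_alt
  cases hmin : PySem.List.min? x_range (fun y => y) with
  | none => cases hmax : PySem.List.max? x_range (fun y => y) <;> rfl
  | some mn =>
    cases hmax : PySem.List.max? x_range (fun y => y) with
    | none => rfl
    | some mx => exact core_eq mn mx x_vel
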